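-- pv_equiv track=rewrite | github.com/Hemakotibonthada/Ai-agent | backend/agents/memory_agent.py | _extract_memory_content
-- ===== SOURCE A (Python) =====
-- def _extract_memory_content(message: str) -> str:
--     """Extract the content to store from a user's message."""
--     prefixes = [
--         "remember that ", "remember ", "store that ", "store ",
--         "memorize that ", "memorize ", "memorise that ", "memorise ",
--         "save that ", "save ", "note that ", "note ",
--         "keep in mind that ", "keep in mind ",
--         "record this ", "record that ", "record ",
--         "don't forget that ", "don't forget ",
--     ]
--     content = message
--     for prefix in prefixes:
--         if content.startswith(prefix):
--             content = content[len(prefix):]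
--             break
--     return content.strip().capitalize() if content.strip() else message
-- ===== SOURCE B (Python) =====
-- def _extract_memory_content(message: str) -> str:
--     """Extract the content to store from a user's message."""
--     content = message
--     head, sep, rest = message.partition(" ")
--     if sep:
--         if head in ("remember", "store", "memorize", "memorise", "save", "note"):
--             content = rest[5:] if rest.startswith("that ") else rest
--         elif head == "record":
--             content = rest[5:] if rest.startswith("this ") or rest.startswith("that ") else rest
--         elif message.startswith("keep in mind "):
--             r = message[13:]
--             content = r[5:] if r.startswith("that ") else r
--         elif message.startswith("don't forget "):
--             r = message[13:]
--             content = r[5:] if r.startswith("that ") else r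
--     s = content.strip()
--     return s.capitalize() if s else message
-- ===== Notes on version B (the rewrite author's own statement) =====
-- stated objective: alternative
-- what changed: A scans a 19-element prefix list with startswith until the first match; B instead splits the message at its first space once (str.partition) and dispatches on the first word via a small keyword table, then checks only the one relevant continuation word.
import Mathlib
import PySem

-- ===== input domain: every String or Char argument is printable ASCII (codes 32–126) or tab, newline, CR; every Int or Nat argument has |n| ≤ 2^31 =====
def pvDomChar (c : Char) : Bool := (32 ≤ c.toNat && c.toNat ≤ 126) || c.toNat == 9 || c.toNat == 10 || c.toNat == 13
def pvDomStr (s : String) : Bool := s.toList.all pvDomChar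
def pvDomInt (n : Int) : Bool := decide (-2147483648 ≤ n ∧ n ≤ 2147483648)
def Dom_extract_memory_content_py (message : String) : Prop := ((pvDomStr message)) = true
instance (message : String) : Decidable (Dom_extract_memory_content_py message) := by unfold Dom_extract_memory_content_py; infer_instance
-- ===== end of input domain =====

-- B replaces A's 19-prefix linear startswith scan by one split on the first space plus a keyword lookup; objective: alternative (same behaviour, proved equal on all inputs).

-- ===== PORT A =====
-- Python str.capitalize() (exact on ASCII: first char uppercased, rest lowercased); used by both ports' identical tails.
def pyCapitalize (l : List Char) : List Char :=
  match l with
  | [] => []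
  | c :: t => PySem.Chars.upperChar c :: t.map PySem.Chars.lowerChar

def prefixesA : List (List Char) :=
  ["remember that ".toList, "remember ".toList, "store that ".toList, "store ".toList,
   "memorize that ".toList, "memorize ".toList, "memorise that ".toList, "memorise ".toList,
   "save that ".toList, "save ".toList, "note that ".toList, "note ".toList,
   "keep in mind that ".toList, "keep in mind ".toList,
   "record this ".toList, "record that ".toList, "record ".toList,
   "don't forget that ".toList, "don't forget ".toList]

-- A's for-loop with break: first matching prefix is stripped, then the loop stops.
def loopA : List (List Char) → List Char → List Char
  | [], content => content
  | p :: ps, content =>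
      if PySem.Chars.startswith content p then
        PySem.List.slice content (some (p.length : Int)) none
      else loopA ps content

def extract_memory_content_py (message : String) : String :=
  let content := loopA prefixesA message.toList
  let s := PySem.Chars.strip content
  if s ≠ [] then String.ofList (pyCapitalize s) else message

-- ===== PORT B =====
-- Python str.partition(" "): (head, sep-found?, rest).
def pyPartition : List Char → List Char × Bool × List Char
  | [] => ([], false, [])
  | c :: t =>
      if c = ' ' then ([], true, t)
      else
        let r := pyPartition t
        (c :: r.1, r.2.1, r.2.2)

def verbsB : List (List Char) :=
  ["remember".toList, "store".toList, "memorize".toList, "memorise".toList,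
   "save".toList, "note".toList]

def bContent (m : List Char) : List Char :=
  let p := pyPartition m
  let head := p.1
  let rest := p.2.2
  if p.2.1 then
    if verbsB.contains head then
      if PySem.Chars.startswith rest "that ".toList then PySem.List.slice rest (some 5) none else rest
    else if head = "record".toList then
      if PySem.Chars.startswith rest "this ".toList || PySem.Chars.startswith rest "that ".toList then
        PySem.List.slice rest (some 5) none
      else rest
    else if PySem.Chars.startswith m "keep in mind ".toList then
      let r := PySem.List.slice m (some 13) none
      if PySem.Chars.startswith r "that ".toList then PySem.List.slice r (some 5) none else r
    else if PySem.Chars.startswith m "don't forget ".toList then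
      let r := PySem.List.slice m (some 13) none
      if PySem.Chars.startswith r "that ".toList then PySem.List.slice r (some 5) none else r
    else m
  else m

def extract_memory_content_py_alt (message : String) : String :=
  let content := bContent message.toList
  let s := PySem.Chars.strip content
  if s ≠ [] then String.ofList (pyCapitalize s) else message

-- ===== PRECONDITION & SPEC =====
def Spec_extract_memory_content_py (message : String) (out : String) : Prop := out = extract_memory_content_py_alt message
instance (message : String) (out : String) : Decidable (Spec_extract_memory_content_py message out) := by unfold Spec_extract_memory_content_py; infer_instance

-- ===== CLAIM (what is proved, stated in full; the proofs are below) =====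
def Claim_equal_extract_memory_content_py : Prop := ∀ (message : String), Dom_extract_memory_content_py message → Spec_extract_memory_content_py message (extract_memory_content_py message)

-- ===== LEMMAS AND PROOFS =====

lemma partition_false (l : List Char) (h : (pyPartition l).2.1 = false) : ' ' ∉ l := by
  induction l with
  | nil => simp
  | cons c t ih =>
      by_cases hc : c = ' '
      · simp [pyPartition, hc] at h
      · simp only [pyPartition, if_neg hc] at h
        simp only [List.mem_cons, not_or]
        exact ⟨fun hcc => hc hcc.symm, ih h⟩

lemma partition_true (l : List Char) (h : (pyPartition l).2.1 = true) :
    l = (pyPartition l).1 ++ ' ' :: (pyPartition l).2.2 ∧ ' ' ∉ (pyPartition l).1 := by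
  induction l with
  | nil => simp [pyPartition] at h
  | cons c t ih =>
      by_cases hc : c = ' '
      · simp [pyPartition, hc]
      · simp only [pyPartition, if_neg hc] at h ⊢
        obtain ⟨h1, h2⟩ := ih h
        refine ⟨by simpa using congrArg (c :: ·) h1, ?_⟩
        simp only [List.mem_cons, not_or]
        exact ⟨fun hcc => hc hcc.symm, h2⟩

lemma sw_nil (l : List Char) : PySem.Chars.startswith l ([] : List Char) = true := by
  cases l <;> rfl

lemma sw_append (a : List Char) : ∀ (l b : List Char),
    PySem.Chars.startswith l (a ++ b)
      = (PySem.Chars.startswith l a && PySem.Chars.startswith (l.drop a.length) b) := by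
  induction a with
  | nil => intro l b; simp [sw_nil]
  | cons c a' ih =>
      intro l b
      cases l with
      | nil => simp [PySem.Chars.startswith, List.isPrefixOf]
      | cons d l' =>
          simp only [PySem.Chars.startswith, List.cons_append, List.isPrefixOf,
            List.length_cons, List.drop_succ_cons] at *
          rw [ih l' b, Bool.and_assoc]

lemma word_decomp : ∀ (hd w rest q : List Char), ' ' ∉ hd → ' ' ∉ w →
    hd ++ ' ' :: rest = w ++ ' ' :: q → hd = w ∧ rest = q := by
  intro hd
  induction hd with
  | nil =>
      intro w rest q _ hw h
      cases w with
      | nil => simpa using h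
      | cons d w' =>
          simp only [List.nil_append, List.cons_append, List.cons.injEq] at h
          exact absurd (h.1 ▸ List.mem_cons_self) hw
  | cons c hd' ih =>
      intro w rest q hhd hw h
      cases w with
      | nil =>
          simp only [List.nil_append, List.cons_append, List.cons.injEq] at h
          exact absurd (h.1 ▸ List.mem_cons_self) hhd
      | cons d w' =>
          simp only [List.cons_append, List.cons.injEq] at h
          obtain ⟨h1, h2⟩ := ih w' rest q (fun hm => hhd (List.mem_cons_of_mem _ hm))
            (fun hm => hw (List.mem_cons_of_mem _ hm)) h.2
          exact ⟨by simp [h.1, h1], h2⟩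

lemma sw_head (hd w rest : List Char) (hhd : ' ' ∉ hd) (hw : ' ' ∉ w) :
    PySem.Chars.startswith (hd ++ ' ' :: rest) (w ++ [' ']) = decide (hd = w) := by
  by_cases h : hd = w
  · subst h
    simp only [decide_true]
    rw [PySem.Chars.startswith_iff]
    exact ⟨rest, by simp⟩
  · simp only [h, decide_false]
    by_contra hb
    rw [Bool.not_eq_false, PySem.Chars.startswith_iff] at hb
    obtain ⟨t, ht⟩ := hb
    simp only [List.append_assoc, List.singleton_append] at ht
    exact h (word_decomp w hd t rest hw hhd ht).1.symm

lemma sw_word (hd w rest q : List Char) (hhd : ' ' ∉ hd) (hw : ' ' ∉ w) :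
    PySem.Chars.startswith (hd ++ ' ' :: rest) (w ++ ' ' :: q)
      = (decide (hd = w) && PySem.Chars.startswith rest q) := by
  rw [show w ++ ' ' :: q = (w ++ [' ']) ++ q from by simp, sw_append, sw_head hd w rest hhd hw]
  by_cases h : hd = w
  · subst h
    have hdrop : (hd ++ ' ' :: rest).drop ((hd ++ [' ']).length) = rest := by
      rw [show hd ++ ' ' :: rest = (hd ++ [' ']) ++ rest from by simp]
      exact List.drop_left
    rw [hdrop]
  · simp [h]

lemma drop_decomp (hd rest : List Char) (k : Nat) :
    (hd ++ ' ' :: rest).drop (hd.length + 1 + k) = rest.drop k := by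
  rw [show hd ++ ' ' :: rest = (hd ++ [' ']) ++ rest from by simp,
      show hd.length + 1 + k = (hd ++ [' ']).length + k from by simp,
      List.drop_append, List.drop_eq_nil_of_le (Nat.le_add_right _ _), Nat.add_sub_cancel_left,
      List.nil_append]

lemma no_space_sw (l p : List Char) (hl : ' ' ∉ l) (hp : ' ' ∈ p) :
    PySem.Chars.startswith l p = false := by
  by_contra hb
  rw [Bool.not_eq_false, PySem.Chars.startswith_iff] at hb
  exact hl (hb.subset hp)

lemma loopA_skip (ps : List (List Char)) (m : List Char)
    (h : ∀ p ∈ ps, ' ' ∈ p) (hm : ' ' ∉ m) : loopA ps m = m := by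
  induction ps with
  | nil => rfl
  | cons p ps ih =>
      rw [loopA, no_space_sw m p hm (h p List.mem_cons_self)]
      simp only [Bool.false_eq_true, if_false]
      exact ih (fun q hq => h q (List.mem_cons_of_mem _ hq))

lemma swp_0 (hd rest : List Char) (hhd : ' ' ∉ hd) :
    PySem.Chars.startswith (hd ++ ' ' :: rest) "remember that ".toList
      = (decide (hd = "remember".toList) && PySem.Chars.startswith rest "that ".toList) := by
  rw [show ("remember that ".toList) = "remember".toList ++ ' ' :: "that ".toList from by decide]
  exact sw_word hd "remember".toList rest "that ".toList hhd (by decide)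

lemma swp_1 (hd rest : List Char) (hhd : ' ' ∉ hd) :
    PySem.Chars.startswith (hd ++ ' ' :: rest) "remember ".toList
      = (decide (hd = "remember".toList) && PySem.Chars.startswith rest "".toList) := by
  rw [show ("remember ".toList) = "remember".toList ++ ' ' :: "".toList from by decide]
  exact sw_word hd "remember".toList rest "".toList hhd (by decide)

lemma swp_2 (hd rest : List Char) (hhd : ' ' ∉ hd) :
    PySem.Chars.startswith (hd ++ ' ' :: rest) "store that ".toList
      = (decide (hd = "store".toList) && PySem.Chars.startswith rest "that ".toList) := by
  rw [show ("store that ".toList) = "store".toList ++ ' ' :: "that ".toList from by decide]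
  exact sw_word hd "store".toList rest "that ".toList hhd (by decide)

lemma swp_3 (hd rest : List Char) (hhd : ' ' ∉ hd) :
    PySem.Chars.startswith (hd ++ ' ' :: rest) "store ".toList
      = (decide (hd = "store".toList) && PySem.Chars.startswith rest "".toList) := by
  rw [show ("store ".toList) = "store".toList ++ ' ' :: "".toList from by decide]
  exact sw_word hd "store".toList rest "".toList hhd (by decide)

lemma swp_4 (hd rest : List Char) (hhd : ' ' ∉ hd) :
    PySem.Chars.startswith (hd ++ ' ' :: rest) "memorize that ".toList
      = (decide (hd = "memorize".toList) && PySem.Chars.startswith rest "that ".toList) := by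
  rw [show ("memorize that ".toList) = "memorize".toList ++ ' ' :: "that ".toList from by decide]
  exact sw_word hd "memorize".toList rest "that ".toList hhd (by decide)

lemma swp_5 (hd rest : List Char) (hhd : ' ' ∉ hd) :
    PySem.Chars.startswith (hd ++ ' ' :: rest) "memorize ".toList
      = (decide (hd = "memorize".toList) && PySem.Chars.startswith rest "".toList) := by
  rw [show ("memorize ".toList) = "memorize".toList ++ ' ' :: "".toList from by decide]
  exact sw_word hd "memorize".toList rest "".toList hhd (by decide)

lemma swp_6 (hd rest : List Char) (hhd : ' ' ∉ hd) :
    PySem.Chars.startswith (hd ++ ' ' :: rest) "memorise that ".toList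
      = (decide (hd = "memorise".toList) && PySem.Chars.startswith rest "that ".toList) := by
  rw [show ("memorise that ".toList) = "memorise".toList ++ ' ' :: "that ".toList from by decide]
  exact sw_word hd "memorise".toList rest "that ".toList hhd (by decide)

lemma swp_7 (hd rest : List Char) (hhd : ' ' ∉ hd) :
    PySem.Chars.startswith (hd ++ ' ' :: rest) "memorise ".toList
      = (decide (hd = "memorise".toList) && PySem.Chars.startswith rest "".toList) := by
  rw [show ("memorise ".toList) = "memorise".toList ++ ' ' :: "".toList from by decide]
  exact sw_word hd "memorise".toList rest "".toList hhd (by decide)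

lemma swp_8 (hd rest : List Char) (hhd : ' ' ∉ hd) :
    PySem.Chars.startswith (hd ++ ' ' :: rest) "save that ".toList
      = (decide (hd = "save".toList) && PySem.Chars.startswith rest "that ".toList) := by
  rw [show ("save that ".toList) = "save".toList ++ ' ' :: "that ".toList from by decide]
  exact sw_word hd "save".toList rest "that ".toList hhd (by decide)

lemma swp_9 (hd rest : List Char) (hhd : ' ' ∉ hd) :
    PySem.Chars.startswith (hd ++ ' ' :: rest) "save ".toList
      = (decide (hd = "save".toList) && PySem.Chars.startswith rest "".toList) := by
  rw [show ("save ".toList) = "save".toList ++ ' ' :: "".toList from by decide]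
  exact sw_word hd "save".toList rest "".toList hhd (by decide)

lemma swp_10 (hd rest : List Char) (hhd : ' ' ∉ hd) :
    PySem.Chars.startswith (hd ++ ' ' :: rest) "note that ".toList
      = (decide (hd = "note".toList) && PySem.Chars.startswith rest "that ".toList) := by
  rw [show ("note that ".toList) = "note".toList ++ ' ' :: "that ".toList from by decide]
  exact sw_word hd "note".toList rest "that ".toList hhd (by decide)

lemma swp_11 (hd rest : List Char) (hhd : ' ' ∉ hd) :
    PySem.Chars.startswith (hd ++ ' ' :: rest) "note ".toList
      = (decide (hd = "note".toList) && PySem.Chars.startswith rest "".toList) := by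
  rw [show ("note ".toList) = "note".toList ++ ' ' :: "".toList from by decide]
  exact sw_word hd "note".toList rest "".toList hhd (by decide)

lemma swp_12 (hd rest : List Char) (hhd : ' ' ∉ hd) :
    PySem.Chars.startswith (hd ++ ' ' :: rest) "keep in mind that ".toList
      = (decide (hd = "keep".toList) && PySem.Chars.startswith rest "in mind that ".toList) := by
  rw [show ("keep in mind that ".toList) = "keep".toList ++ ' ' :: "in mind that ".toList from by decide]
  exact sw_word hd "keep".toList rest "in mind that ".toList hhd (by decide)

lemma swp_13 (hd rest : List Char) (hhd : ' ' ∉ hd) :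
    PySem.Chars.startswith (hd ++ ' ' :: rest) "keep in mind ".toList
      = (decide (hd = "keep".toList) && PySem.Chars.startswith rest "in mind ".toList) := by
  rw [show ("keep in mind ".toList) = "keep".toList ++ ' ' :: "in mind ".toList from by decide]
  exact sw_word hd "keep".toList rest "in mind ".toList hhd (by decide)

lemma swp_14 (hd rest : List Char) (hhd : ' ' ∉ hd) :
    PySem.Chars.startswith (hd ++ ' ' :: rest) "record this ".toList
      = (decide (hd = "record".toList) && PySem.Chars.startswith rest "this ".toList) := by
  rw [show ("record this ".toList) = "record".toList ++ ' ' :: "this ".toList from by decide]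
  exact sw_word hd "record".toList rest "this ".toList hhd (by decide)

lemma swp_15 (hd rest : List Char) (hhd : ' ' ∉ hd) :
    PySem.Chars.startswith (hd ++ ' ' :: rest) "record that ".toList
      = (decide (hd = "record".toList) && PySem.Chars.startswith rest "that ".toList) := by
  rw [show ("record that ".toList) = "record".toList ++ ' ' :: "that ".toList from by decide]
  exact sw_word hd "record".toList rest "that ".toList hhd (by decide)

lemma swp_16 (hd rest : List Char) (hhd : ' ' ∉ hd) :
    PySem.Chars.startswith (hd ++ ' ' :: rest) "record ".toList
      = (decide (hd = "record".toList) && PySem.Chars.startswith rest "".toList) := by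
  rw [show ("record ".toList) = "record".toList ++ ' ' :: "".toList from by decide]
  exact sw_word hd "record".toList rest "".toList hhd (by decide)

lemma swp_17 (hd rest : List Char) (hhd : ' ' ∉ hd) :
    PySem.Chars.startswith (hd ++ ' ' :: rest) "don't forget that ".toList
      = (decide (hd = "don't".toList) && PySem.Chars.startswith rest "forget that ".toList) := by
  rw [show ("don't forget that ".toList) = "don't".toList ++ ' ' :: "forget that ".toList from by decide]
  exact sw_word hd "don't".toList rest "forget that ".toList hhd (by decide)

lemma swp_18 (hd rest : List Char) (hhd : ' ' ∉ hd) :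
    PySem.Chars.startswith (hd ++ ' ' :: rest) "don't forget ".toList
      = (decide (hd = "don't".toList) && PySem.Chars.startswith rest "forget ".toList) := by
  rw [show ("don't forget ".toList) = "don't".toList ++ ' ' :: "forget ".toList from by decide]
  exact sw_word hd "don't".toList rest "forget ".toList hhd (by decide)

lemma slice5 (l : List Char) : PySem.List.slice l (some 5) none = l.drop 5 := by
  simp [pysem]

lemma slice13 (l : List Char) : PySem.List.slice l (some 13) none = l.drop 13 := by
  simp [pysem]

lemma content_eq (m : List Char) : loopA prefixesA m = bContent m := by
  rcases hp : pyPartition m with ⟨hd, sep, rest⟩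
  unfold bContent
  rw [hp]
  cases sep with
  | false =>
      have hm : ' ' ∉ m := partition_false m (by rw [hp])
      simp only [Bool.false_eq_true, if_false]
      exact loopA_skip prefixesA m (by decide) hm
  | true =>
      have hpt := partition_true m (by rw [hp])
      rw [hp] at hpt
      obtain ⟨hm, hhd⟩ := hpt
      simp only at hm hhd
      subst hm
      simp only [if_true]
      simp only [loopA, prefixesA, swp_0 hd rest hhd, swp_1 hd rest hhd, swp_2 hd rest hhd, swp_3 hd rest hhd, swp_4 hd rest hhd, swp_5 hd rest hhd, swp_6 hd rest hhd, swp_7 hd rest hhd, swp_8 hd rest hhd, swp_9 hd rest hhd, swp_10 hd rest hhd, swp_11 hd rest hhd, swp_12 hd rest hhd, swp_13 hd rest hhd, swp_14 hd rest hhd, swp_15 hd rest hhd, swp_16 hd rest hhd, swp_17 hd rest hhd, swp_18 hd rest hhd, sw_nil,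
        PySem.List.slice_from_natCast, Bool.and_true]
      clear hp
      by_cases hv0 : hd = "remember".toList
      · subst hv0
        have ha1 : List.drop ("remember that ".toList.length) ("remember".toList ++ ' ' :: rest) = rest.drop 5 := by
          rw [show ("remember that ".toList.length) = ("remember".toList).length + 1 + 5 from by decide, drop_decomp]
        have ha2 : List.drop ("remember ".toList.length) ("remember".toList ++ ' ' :: rest) = rest := by
          rw [show ("remember ".toList.length) = ("remember".toList).length + 1 + 0 from by decide, drop_decomp,
            List.drop_zero]
        rw [ha1, ha2, slice5]
        simp only [show decide ("remember".toList = "remember".toList) = true from by decide, show decide ("remember".toList = "store".toList) = false from by decide, show decide ("remember".toList = "memorize".toList) = false from by decide, show decide ("remember".toList = "memorise".toList) = false from by decide, show decide ("remember".toList = "save".toList) = false from by decide, show decide ("remember".toList = "note".toList) = false from by decide, show decide ("remember".toList = "keep".toList) = false from by decide, show decide ("remember".toList = "record".toList) = false from by decide, show decide ("remember".toList = "don't".toList) = false from by decide,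
          show ("".toList : List Char) = ([] : List Char) from by decide, sw_nil,
          show verbsB.contains ("remember".toList) = true from by decide,
          Bool.true_and, Bool.false_and, Bool.and_true, Bool.false_eq_true, if_false, if_true]
        split_ifs <;> simp_all
      by_cases hv1 : hd = "store".toList
      · subst hv1
        have ha1 : List.drop ("store that ".toList.length) ("store".toList ++ ' ' :: rest) = rest.drop 5 := by
          rw [show ("store that ".toList.length) = ("store".toList).length + 1 + 5 from by decide, drop_decomp]
        have ha2 : List.drop ("store ".toList.length) ("store".toList ++ ' ' :: rest) = rest := by
          rw [show ("store ".toList.length) = ("store".toList).length + 1 + 0 from by decide, drop_decomp,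
            List.drop_zero]
        rw [ha1, ha2, slice5]
        simp only [show decide ("store".toList = "remember".toList) = false from by decide, show decide ("store".toList = "store".toList) = true from by decide, show decide ("store".toList = "memorize".toList) = false from by decide, show decide ("store".toList = "memorise".toList) = false from by decide, show decide ("store".toList = "save".toList) = false from by decide, show decide ("store".toList = "note".toList) = false from by decide, show decide ("store".toList = "keep".toList) = false from by decide, show decide ("store".toList = "record".toList) = false from by decide, show decide ("store".toList = "don't".toList) = false from by decide,
          show ("".toList : List Char) = ([] : List Char) from by decide, sw_nil,
          show verbsB.contains ("store".toList) = true from by decide,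
          Bool.true_and, Bool.false_and, Bool.and_true, Bool.false_eq_true, if_false, if_true]
        split_ifs <;> simp_all
      by_cases hv2 : hd = "memorize".toList
      · subst hv2
        have ha1 : List.drop ("memorize that ".toList.length) ("memorize".toList ++ ' ' :: rest) = rest.drop 5 := by
          rw [show ("memorize that ".toList.length) = ("memorize".toList).length + 1 + 5 from by decide, drop_decomp]
        have ha2 : List.drop ("memorize ".toList.length) ("memorize".toList ++ ' ' :: rest) = rest := by
          rw [show ("memorize ".toList.length) = ("memorize".toList).length + 1 + 0 from by decide, drop_decomp,
            List.drop_zero]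
        rw [ha1, ha2, slice5]
        simp only [show decide ("memorize".toList = "remember".toList) = false from by decide, show decide ("memorize".toList = "store".toList) = false from by decide, show decide ("memorize".toList = "memorize".toList) = true from by decide, show decide ("memorize".toList = "memorise".toList) = false from by decide, show decide ("memorize".toList = "save".toList) = false from by decide, show decide ("memorize".toList = "note".toList) = false from by decide, show decide ("memorize".toList = "keep".toList) = false from by decide, show decide ("memorize".toList = "record".toList) = false from by decide, show decide ("memorize".toList = "don't".toList) = false from by decide,
          show ("".toList : List Char) = ([] : List Char) from by decide, sw_nil,
          show verbsB.contains ("memorize".toList) = true from by decide,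
          Bool.true_and, Bool.false_and, Bool.and_true, Bool.false_eq_true, if_false, if_true]
        split_ifs <;> simp_all
      by_cases hv3 : hd = "memorise".toList
      · subst hv3
        have ha1 : List.drop ("memorise that ".toList.length) ("memorise".toList ++ ' ' :: rest) = rest.drop 5 := by
          rw [show ("memorise that ".toList.length) = ("memorise".toList).length + 1 + 5 from by decide, drop_decomp]
        have ha2 : List.drop ("memorise ".toList.length) ("memorise".toList ++ ' ' :: rest) = rest := by
          rw [show ("memorise ".toList.length) = ("memorise".toList).length + 1 + 0 from by decide, drop_decomp,
            List.drop_zero]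
        rw [ha1, ha2, slice5]
        simp only [show decide ("memorise".toList = "remember".toList) = false from by decide, show decide ("memorise".toList = "store".toList) = false from by decide, show decide ("memorise".toList = "memorize".toList) = false from by decide, show decide ("memorise".toList = "memorise".toList) = true from by decide, show decide ("memorise".toList = "save".toList) = false from by decide, show decide ("memorise".toList = "note".toList) = false from by decide, show decide ("memorise".toList = "keep".toList) = false from by decide, show decide ("memorise".toList = "record".toList) = false from by decide, show decide ("memorise".toList = "don't".toList) = false from by decide,
          show ("".toList : List Char) = ([] : List Char) from by decide, sw_nil,
          show verbsB.contains ("memorise".toList) = true from by decide,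
          Bool.true_and, Bool.false_and, Bool.and_true, Bool.false_eq_true, if_false, if_true]
        split_ifs <;> simp_all
      by_cases hv4 : hd = "save".toList
      · subst hv4
        have ha1 : List.drop ("save that ".toList.length) ("save".toList ++ ' ' :: rest) = rest.drop 5 := by
          rw [show ("save that ".toList.length) = ("save".toList).length + 1 + 5 from by decide, drop_decomp]
        have ha2 : List.drop ("save ".toList.length) ("save".toList ++ ' ' :: rest) = rest := by
          rw [show ("save ".toList.length) = ("save".toList).length + 1 + 0 from by decide, drop_decomp,
            List.drop_zero]
        rw [ha1, ha2, slice5]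
        simp only [show decide ("save".toList = "remember".toList) = false from by decide, show decide ("save".toList = "store".toList) = false from by decide, show decide ("save".toList = "memorize".toList) = false from by decide, show decide ("save".toList = "memorise".toList) = false from by decide, show decide ("save".toList = "save".toList) = true from by decide, show decide ("save".toList = "note".toList) = false from by decide, show decide ("save".toList = "keep".toList) = false from by decide, show decide ("save".toList = "record".toList) = false from by decide, show decide ("save".toList = "don't".toList) = false from by decide,
          show ("".toList : List Char) = ([] : List Char) from by decide, sw_nil,
          show verbsB.contains ("save".toList) = true from by decide,
          Bool.true_and, Bool.false_and, Bool.and_true, Bool.false_eq_true, if_false, if_true]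
        split_ifs <;> simp_all
      by_cases hv5 : hd = "note".toList
      · subst hv5
        have ha1 : List.drop ("note that ".toList.length) ("note".toList ++ ' ' :: rest) = rest.drop 5 := by
          rw [show ("note that ".toList.length) = ("note".toList).length + 1 + 5 from by decide, drop_decomp]
        have ha2 : List.drop ("note ".toList.length) ("note".toList ++ ' ' :: rest) = rest := by
          rw [show ("note ".toList.length) = ("note".toList).length + 1 + 0 from by decide, drop_decomp,
            List.drop_zero]
        rw [ha1, ha2, slice5]
        simp only [show decide ("note".toList = "remember".toList) = false from by decide, show decide ("note".toList = "store".toList) = false from by decide, show decide ("note".toList = "memorize".toList) = false from by decide, show decide ("note".toList = "memorise".toList) = false from by decide, show decide ("note".toList = "save".toList) = false from by decide, show decide ("note".toList = "note".toList) = true from by decide, show decide ("note".toList = "keep".toList) = false from by decide, show decide ("note".toList = "record".toList) = false from by decide, show decide ("note".toList = "don't".toList) = false from by decide,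
          show ("".toList : List Char) = ([] : List Char) from by decide, sw_nil,
          show verbsB.contains ("note".toList) = true from by decide,
          Bool.true_and, Bool.false_and, Bool.and_true, Bool.false_eq_true, if_false, if_true]
        split_ifs <;> simp_all
      by_cases hv6 : hd = "keep".toList
      · subst hv6
        have hb : PySem.List.slice ("keep".toList ++ ' ' :: rest) (some 13) none = rest.drop 8 := by
          rw [slice13, show (13 : Nat) = ("keep".toList).length + 1 + 8 from by decide, drop_decomp]
        have ha1 : List.drop ("keep in mind that ".toList.length) ("keep".toList ++ ' ' :: rest)
            = rest.drop 13 := by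
          rw [show ("keep in mind that ".toList.length) = ("keep".toList).length + 1 + 13 from by decide,
            drop_decomp]
        have ha2 : List.drop ("keep in mind ".toList.length) ("keep".toList ++ ' ' :: rest)
            = rest.drop 8 := by
          rw [show ("keep in mind ".toList.length) = ("keep".toList).length + 1 + 8 from by decide,
            drop_decomp]
        simp only [hb, ha1, ha2, slice5]
        rw [show ("in mind that ".toList) = "in mind ".toList ++ "that ".toList from by decide, sw_append,
          show (("in mind ".toList).length) = 8 from by decide]
        simp only [List.drop_drop, show (5 + 8 : Nat) = 13 from by decide]
        simp only [show decide ("keep".toList = "remember".toList) = false from by decide, show decide ("keep".toList = "store".toList) = false from by decide, show decide ("keep".toList = "memorize".toList) = false from by decide, show decide ("keep".toList = "memorise".toList) = false from by decide, show decide ("keep".toList = "save".toList) = false from by decide, show decide ("keep".toList = "note".toList) = false from by decide, show decide ("keep".toList = "keep".toList) = true from by decide, show decide ("keep".toList = "record".toList) = false from by decide, show decide ("keep".toList = "don't".toList) = false from by decide,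
          show verbsB.contains ("keep".toList) = false from by decide,
          show (("keep".toList = "record".toList)) = False from by simp,
          Bool.true_and, Bool.false_and, Bool.and_true, Bool.false_eq_true, if_false, if_true]
        split_ifs <;> simp_all
      by_cases hv7 : hd = "record".toList
      · subst hv7
        have ha1 : List.drop ("record this ".toList.length) ("record".toList ++ ' ' :: rest)
            = rest.drop 5 := by
          rw [show ("record this ".toList.length) = ("record".toList).length + 1 + 5 from by decide,
            drop_decomp]
        have ha2 : List.drop ("record that ".toList.length) ("record".toList ++ ' ' :: rest)
            = rest.drop 5 := by
          rw [show ("record that ".toList.length) = ("record".toList).length + 1 + 5 from by decide,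
            drop_decomp]
        have ha3 : List.drop ("record ".toList.length) ("record".toList ++ ' ' :: rest) = rest := by
          rw [show ("record ".toList.length) = ("record".toList).length + 1 + 0 from by decide,
            drop_decomp, List.drop_zero]
        rw [ha1, ha2, ha3, slice5]
        simp only [show decide ("record".toList = "remember".toList) = false from by decide, show decide ("record".toList = "store".toList) = false from by decide, show decide ("record".toList = "memorize".toList) = false from by decide, show decide ("record".toList = "memorise".toList) = false from by decide, show decide ("record".toList = "save".toList) = false from by decide, show decide ("record".toList = "note".toList) = false from by decide, show decide ("record".toList = "keep".toList) = false from by decide, show decide ("record".toList = "record".toList) = true from by decide, show decide ("record".toList = "don't".toList) = false from by decide,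
          show ("".toList : List Char) = ([] : List Char) from by decide, sw_nil,
          show verbsB.contains ("record".toList) = false from by decide,
          Bool.true_and, Bool.false_and, Bool.and_true, Bool.false_eq_true, if_false, if_true]
        split_ifs <;> simp_all
      by_cases hv8 : hd = "don't".toList
      · subst hv8
        have hb : PySem.List.slice ("don't".toList ++ ' ' :: rest) (some 13) none = rest.drop 7 := by
          rw [slice13, show (13 : Nat) = ("don't".toList).length + 1 + 7 from by decide, drop_decomp]
        have ha1 : List.drop ("don't forget that ".toList.length) ("don't".toList ++ ' ' :: rest)
            = rest.drop 12 := by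
          rw [show ("don't forget that ".toList.length) = ("don't".toList).length + 1 + 12 from by decide,
            drop_decomp]
        have ha2 : List.drop ("don't forget ".toList.length) ("don't".toList ++ ' ' :: rest)
            = rest.drop 7 := by
          rw [show ("don't forget ".toList.length) = ("don't".toList).length + 1 + 7 from by decide,
            drop_decomp]
        simp only [hb, ha1, ha2, slice5]
        rw [show ("forget that ".toList) = "forget ".toList ++ "that ".toList from by decide, sw_append,
          show (("forget ".toList).length) = 7 from by decide]
        simp only [List.drop_drop, show (5 + 7 : Nat) = 12 from by decide]
        simp only [show decide ("don't".toList = "remember".toList) = false from by decide, show decide ("don't".toList = "store".toList) = false from by decide, show decide ("don't".toList = "memorize".toList) = false from by decide, show decide ("don't".toList = "memorise".toList) = false from by decide, show decide ("don't".toList = "save".toList) = false from by decide, show decide ("don't".toList = "note".toList) = false from by decide, show decide ("don't".toList = "keep".toList) = false from by decide, show decide ("don't".toList = "record".toList) = false from by decide, show decide ("don't".toList = "don't".toList) = true from by decide,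
          show verbsB.contains ("don't".toList) = false from by decide,
          show (("don't".toList = "record".toList)) = False from by simp,
          Bool.true_and, Bool.false_and, Bool.and_true, Bool.false_eq_true, if_false, if_true]
        split_ifs <;> simp_all
      · -- hd is none of the keyword first words: no prefix matches, both sides return the input
        simp_all [verbsB, show ("".toList : List Char) = ([] : List Char) from by decide, sw_nil]


-- ===== VERDICT (by name: the statement is the Claim_ definition above) =====
theorem extract_memory_content_py_spec : Claim_equal_extract_memory_content_py := by
  intro message _
  unfold Spec_extract_memory_content_py extract_memory_content_py extract_memory_content_py_alt
  rw [content_eq]
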